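-- pv_equiv track=rewrite | github.com/jgamblin/RiskAnalyzer | pipeline/cvss_templates.py | parse_cvss4_vector
-- ===== SOURCE A (Python) =====
-- def parse_cvss4_vector(vector_string):
--     """Parse 'CVSS:4.0/AV:N/AC:L/...' into {'AV': 'N', 'AC': 'L', ...}"""
--     if not vector_string or '/' not in vector_string:
--         return {}
--     parts = vector_string.split('/')
--     result = {}
--     for part in parts[1:]:
--         if ':' in part:
--             key, val = part.split(':', 1)
--             result[key] = val
--     return result
-- ===== SOURCE B (Python) =====
-- import re
--
-- _PAIR_RE = re.compile(r'/([^/:]*):([^/]*)')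
--
-- def parse_cvss4_vector(vector_string):
--     """Parse 'CVSS:4.0/AV:N/AC:L/...' into {'AV': 'N', 'AC': 'L', ...}"""
--     if not vector_string:
--         return {}
--     return dict(_PAIR_RE.findall(vector_string))
-- ===== Notes on version B (the rewrite author's own statement) =====
-- stated objective: idiomatic
-- what changed: Replaces the explicit split('/') loop with inner split(':',1) by a single precompiled regex findall over the string fed straight into dict(), with only the falsy-input guard kept.
import Mathlib
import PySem

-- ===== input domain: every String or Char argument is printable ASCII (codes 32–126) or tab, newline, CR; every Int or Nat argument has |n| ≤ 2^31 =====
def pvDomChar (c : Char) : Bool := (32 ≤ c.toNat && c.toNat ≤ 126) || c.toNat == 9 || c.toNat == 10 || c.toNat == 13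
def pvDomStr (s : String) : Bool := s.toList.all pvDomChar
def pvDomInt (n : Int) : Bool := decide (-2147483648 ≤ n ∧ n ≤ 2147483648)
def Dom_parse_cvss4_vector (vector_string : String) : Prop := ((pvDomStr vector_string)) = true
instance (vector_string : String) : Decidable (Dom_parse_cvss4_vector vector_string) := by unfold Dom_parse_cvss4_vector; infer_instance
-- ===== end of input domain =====

-- B replaces the split('/')-loop-with-inner-split(':',1) by one regex findall fed into dict(); same values, idiomatic one-liner.

-- ===== PORT A =====
def parse_cvss4_vector (vector_string : String) : List (String × String) :=
  -- if not vector_string or '/' not in vector_string: return {}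
  if vector_string == "" || !(PySem.Str.isIn "/" vector_string) then []
  else
    -- parts = vector_string.split('/')   (sep "/" is nonempty, so split? is never none)
    let parts := (PySem.Str.split? vector_string "/").getD []
    -- for part in parts[1:]: if ':' in part: key, val = part.split(':', 1); result[key] = val
    ((parts.drop 1).foldl
      (fun (result : PySem.Dict String String) (part : String) =>
        if PySem.Str.isIn ":" part then
          match (PySem.Str.splitMax? part ":" 1).getD [] with
          | [key, val] => result.insert key val
          | _ => result      -- unreachable: split(':',1) with ':' in part yields exactly two pieces
        else result)
      PySem.Dict.empty).items

-- ===== PORT B =====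
-- hand port of re.findall(r'/([^/:]*):([^/]*)', s) for this fixed pattern (exact for it):
-- [^/:] is pvNSC, [^/] is pvNS; a match needs a literal '/', then group 1, ':', group 2.
def pvNS (d : Char) : Bool := !(d == '/')
def pvNSC (d : Char) : Bool := !(d == '/') && !(d == ':')

def pvScanB (l : List Char) : List (List Char × List Char) :=
  match l with
  | [] => []
  | c :: rest =>
    if c = '/' then
      -- try to match the pattern starting at this '/': group 1 = longest run of [^/:]
      match hr : rest.dropWhile pvNSC with
      | [] => []               -- end of string: no further match
      | d :: r2 =>
          if d = ':' then      -- ':' found: emit (group1, group2) and resume after group 2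
            (rest.takeWhile pvNSC, r2.takeWhile pvNS) :: pvScanB (r2.dropWhile pvNS)
          else pvScanB (d :: r2)   -- a '/': the engine resumes there
    else pvScanB rest        -- no match can start before a '/'
termination_by l.length
decreasing_by
  · have h1 := List.length_dropWhile_le pvNS r2
    have h2 := List.length_dropWhile_le pvNSC rest
    rw [hr] at h2; simp at h2 ⊢; omega
  · have h2 := List.length_dropWhile_le pvNSC rest
    rw [hr] at h2; simp at h2 ⊢; omega
  · simp

def parse_cvss4_vector_alt (vector_string : String) : List (String × String) :=
  -- if not vector_string: return {}
  if vector_string == "" then []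
  -- return dict(_PAIR_RE.findall(vector_string))
  else (PySem.Dict.ofList ((pvScanB vector_string.toList).map
        (fun q => (String.ofList q.1, String.ofList q.2)))).items

-- ===== PRECONDITION & SPEC =====
def Spec_parse_cvss4_vector (vector_string : String) (out : List (String × String)) : Prop := out = parse_cvss4_vector_alt vector_string
instance (vector_string : String) (out : List (String × String)) : Decidable (Spec_parse_cvss4_vector vector_string out) := by unfold Spec_parse_cvss4_vector; infer_instance

-- ===== CLAIM (what is proved, stated in full; the proofs are below) =====
def Claim_equal_parse_cvss4_vector : Prop := ∀ (vector_string : String), Dom_parse_cvss4_vector vector_string → Spec_parse_cvss4_vector vector_string (parse_cvss4_vector vector_string)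

-- ===== LEMMAS AND PROOFS =====

-- not-colon predicate (for part.split(':', 1))
def pvNC (d : Char) : Bool := !(d == ':')

-- structural model of s.split('/')
def pvMySplit : List Char → List (List Char)
  | [] => [[]]
  | c :: rest =>
      if c = '/' then [] :: pvMySplit rest
      else match pvMySplit rest with
           | [] => [[c]]
           | h :: t => (c :: h) :: t

-- the parts after the first '/', i.e. (pvMySplit l).tail
def pvTailParts (l : List Char) : List (List Char) :=
  match l.dropWhile pvNS with
  | [] => []
  | _ :: r => pvMySplit r

-- the (key, value) pairs A extracts from a list of parts
def pvPairs (parts : List (List Char)) : List (List Char × List Char) :=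
  parts.filterMap (fun p =>
    if ':' ∈ p then some (p.takeWhile pvNC, (p.dropWhile pvNC).tail) else none)

theorem pvMySplit_ne_nil (l : List Char) : pvMySplit l ≠ [] := by
  cases l with
  | nil => simp [pvMySplit]
  | cons c rest =>
    simp only [pvMySplit]
    split
    · simp
    · split <;> simp

theorem pvMySplit_eq (l : List Char) :
    pvMySplit l = l.takeWhile pvNS :: pvTailParts l := by
  induction l with
  | nil => rfl
  | cons c rest ih =>
    by_cases hc : c = '/'
    · subst hc
      simp [pvMySplit, pvTailParts, pvNS]
    · have hns : pvNS c = true := by simp [pvNS, hc]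
      simp only [pvMySplit, if_neg hc, ih, pvTailParts, List.takeWhile_cons,
        List.dropWhile_cons, hns, if_pos]

theorem pvGo_eq (fuel : Nat) : ∀ (l cur : List Char) (accs : List (List Char))
    (p : List Char) (ts : List (List Char)), l.length < fuel → pvMySplit l = p :: ts →
    PySem.Chars.splitOn.go ['/'] fuel l cur accs =
      accs.reverse ++ ((cur.reverse ++ p) :: ts) := by
  induction fuel with
  | zero => intro l _ _ _ _ h; omega
  | succ fuel ih =>
    intro l cur accs p ts hlen hsp
    cases l with
    | nil =>
      rw [PySem.Chars.splitOn.go.eq_def]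
      simp only [pvMySplit] at hsp
      cases hsp
      simp
    | cons c rest =>
      rw [PySem.Chars.splitOn.go.eq_def]
      by_cases hc : c = '/'
      · subst hc
        have hsp' : [] :: pvMySplit rest = p :: ts := by
          simpa [pvMySplit] using hsp
        obtain ⟨hp, hts⟩ : ([] : List Char) = p ∧ pvMySplit rest = ts := by
          cases hsp'; exact ⟨rfl, rfl⟩
        subst hp; subst hts
        simp only [List.length_cons] at hlen
        obtain ⟨q, qs, hq⟩ : ∃ q qs, pvMySplit rest = q :: qs := by
          cases hm : pvMySplit rest with
          | nil => exact absurd hm (pvMySplit_ne_nil rest)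
          | cons q qs => exact ⟨q, qs, rfl⟩
        simp only [List.isPrefixOf, beq_self_eq_true, Bool.true_and, if_true,
          List.length_cons, List.length_nil, List.drop_succ_cons, List.drop_zero]
        rw [ih rest [] (cur.reverse :: accs) q qs (by omega) hq]
        simp [hq]
      · simp only [pvMySplit, if_neg hc] at hsp
        obtain ⟨q, qs, hq⟩ : ∃ q qs, pvMySplit rest = q :: qs := by
          cases hm : pvMySplit rest with
          | nil => exact absurd hm (pvMySplit_ne_nil rest)
          | cons q qs => exact ⟨q, qs, rfl⟩
        rw [hq] at hsp
        obtain ⟨hp, hts⟩ : c :: q = p ∧ qs = ts := by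
          cases hsp; exact ⟨rfl, rfl⟩
        subst hp; subst hts
        have hpre : ['/'].isPrefixOf (c :: rest) = false := by
          simp only [List.isPrefixOf, Bool.and_eq_false_iff, beq_eq_false_iff_ne, ne_eq]
          exact Or.inl fun h => absurd h.symm hc
        simp only [List.length_cons] at hlen
        simp only [hpre, Bool.false_eq_true, if_false]
        rw [ih rest (c :: cur) accs q qs (by omega) hq]
        simp

theorem pvSplitOn_eq (l : List Char) :
    PySem.Chars.splitOn l ['/'] = pvMySplit l := by
  obtain ⟨q, qs, hq⟩ : ∃ q qs, pvMySplit l = q :: qs := by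
    cases hm : pvMySplit l with
    | nil => exact absurd hm (pvMySplit_ne_nil l)
    | cons q qs => exact ⟨q, qs, rfl⟩
  unfold PySem.Chars.splitOn
  rw [pvGo_eq (l.length + 1) l [] [] q qs (by omega) hq, hq]
  simp

theorem pvGoM0 (fuel : Nat) : ∀ (l cur : List Char) (accs : List (List Char)),
    PySem.Chars.splitOnMax.go [':'] fuel 0 l cur accs =
      accs.reverse ++ [cur.reverse ++ l] := by
  intro l cur accs
  cases fuel with
  | zero =>
    rw [PySem.Chars.splitOnMax.go.eq_def]
    cases l <;> simp
  | succ fuel =>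
    cases l with
    | nil => rw [PySem.Chars.splitOnMax.go.eq_def]; simp
    | cons c rest => rw [PySem.Chars.splitOnMax.go.eq_def]; simp

theorem pvGoM1 (fuel : Nat) : ∀ (l cur : List Char) (accs : List (List Char)),
    l.length < fuel →
    PySem.Chars.splitOnMax.go [':'] fuel 1 l cur accs =
      accs.reverse ++
        (if ':' ∈ l then [cur.reverse ++ l.takeWhile pvNC, (l.dropWhile pvNC).tail]
         else [cur.reverse ++ l]) := by
  induction fuel with
  | zero => intro l _ _ h; omega
  | succ fuel ih =>
    intro l cur accs hlen
    cases l with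
    | nil =>
      rw [PySem.Chars.splitOnMax.go.eq_def]
      simp
    | cons c rest =>
      rw [PySem.Chars.splitOnMax.go.eq_def]
      simp only [List.length_cons] at hlen
      by_cases hc : c = ':'
      · subst hc
        simp only [List.isPrefixOf, beq_self_eq_true, Bool.true_and, if_true,
          List.length_cons, List.length_nil, List.drop_succ_cons, List.drop_zero]
        rw [pvGoM0 fuel rest [] (cur.reverse :: accs)]
        simp [pvNC]
      · have hpre : [':'].isPrefixOf (c :: rest) = false := by
          simp only [List.isPrefixOf, Bool.and_eq_false_iff, beq_eq_false_iff_ne, ne_eq]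
          exact Or.inl fun h => absurd h.symm hc
        have hnc : pvNC c = true := by simp [pvNC, hc]
        simp only [hpre, Bool.false_eq_true, if_false]
        rw [ih rest (c :: cur) accs (by omega)]
        have hcc : ¬ (':' = c) := fun h => hc h.symm
        by_cases hm : ':' ∈ rest
        · simp [hm, hcc, List.takeWhile_cons_of_pos hnc, List.dropWhile_cons_of_pos hnc]
        · simp [hm, hcc]

theorem pvSOM (p : List Char) (h : ':' ∈ p) :
    PySem.Chars.splitOnMax p [':'] 1 = [p.takeWhile pvNC, (p.dropWhile pvNC).tail] := by
  rw [PySem.Chars.splitOnMax.eq_1]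
  rw [if_neg (by omega)]
  rw [show Int.toNat 1 = 1 from rfl]
  rw [pvGoM1 (p.length + 1) p [] [] (by omega)]
  simp [h]

-- recover the String-level list from the char-level one
theorem pvMapToList (ls : List String) (xs : List (List Char))
    (h : ls.map String.toList = xs) : ls = xs.map String.ofList := by
  subst h
  induction ls with
  | nil => rfl
  | cons a t ih => simpa using ih

theorem pvBody (d : PySem.Dict String String) (p : List Char) :
    (if PySem.Str.isIn ":" (String.ofList p) then
       match (PySem.Str.splitMax? (String.ofList p) ":" 1).getD [] with
       | [key, val] => d.insert key val
       | _ => d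
     else d)
    = if ':' ∈ p then
        d.insert (String.ofList (p.takeWhile pvNC)) (String.ofList ((p.dropWhile pvNC).tail))
      else d := by
  by_cases hmem : ':' ∈ p
  · have hin : PySem.Str.isIn ":" (String.ofList p) = true := by
      rw [PySem.Str.isIn_iff_infix]
      simpa [String.toList_ofList, List.singleton_infix_iff] using hmem
    rw [if_pos hin, if_pos hmem]
    have hbr := PySem.Str.splitMax?_map (String.ofList p) ":" 1
    rw [String.toList_ofList] at hbr
    rw [show (":" : String).toList = [':'] from rfl] at hbr
    rw [PySem.Chars.splitMax?.eq_1] at hbr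
    simp only [List.isEmpty_cons, Bool.false_eq_true, if_false] at hbr
    rw [pvSOM p hmem] at hbr
    cases hs : PySem.Str.splitMax? (String.ofList p) ":" 1 with
    | none => rw [hs] at hbr; simp at hbr
    | some ls =>
      rw [hs] at hbr
      simp only [Option.map_some, Option.some.injEq] at hbr
      have hls := pvMapToList ls _ hbr
      simp only [List.map_cons, List.map_nil] at hls
      rw [hls]
      rfl
  · have hin : PySem.Str.isIn ":" (String.ofList p) = false := by
      cases hb : PySem.Str.isIn ":" (String.ofList p) with
      | false => rfl
      | true =>
        exact absurd (by simpa [String.toList_ofList, List.singleton_infix_iff] using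
          (PySem.Str.isIn_iff_infix ":" (String.ofList p)).mp hb) hmem
    rw [if_neg (by rw [hin]; simp), if_neg hmem]

theorem pvFold (parts : List (List Char)) (d : PySem.Dict String String) :
    parts.foldl
      (fun d p =>
        if ':' ∈ p then
          d.insert (String.ofList (p.takeWhile pvNC)) (String.ofList ((p.dropWhile pvNC).tail))
        else d) d
    = ((pvPairs parts).map (fun q => (String.ofList q.1, String.ofList q.2))).foldl
        (fun d q => d.insert q.1 q.2) d := by
  induction parts generalizing d with
  | nil => rfl
  | cons p rest ih =>
    by_cases hmem : ':' ∈ p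
    · simp only [List.foldl_cons, pvPairs, List.filterMap_cons, if_pos hmem,
        List.map_cons]
      rw [ih]
      rfl
    · simp only [List.foldl_cons, pvPairs, List.filterMap_cons, if_neg hmem]
      rw [ih]
      rfl

-- behaviour of pvNSC-dropWhile when it stops at a ':'
theorem pvT2 (l r2 : List Char) (hr : l.dropWhile pvNSC = ':' :: r2) :
    l.takeWhile pvNS = l.takeWhile pvNSC ++ ':' :: r2.takeWhile pvNS
    ∧ l.dropWhile pvNS = r2.dropWhile pvNS := by
  induction l with
  | nil => simp at hr
  | cons c t ih =>
    by_cases hc : pvNSC c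
    · have hns : pvNS c = true := by
        simp only [pvNSC, Bool.and_eq_true] at hc
        exact hc.1
      rw [List.dropWhile_cons_of_pos hc] at hr
      obtain ⟨h1, h2⟩ := ih hr
      refine ⟨?_, ?_⟩
      · rw [List.takeWhile_cons_of_pos hns, List.takeWhile_cons_of_pos hc, h1]
        rfl
      · rw [List.dropWhile_cons_of_pos hns, h2]
    · rw [List.dropWhile_cons_of_neg (by simpa using hc)] at hr
      obtain ⟨hceq, hteq⟩ : c = ':' ∧ t = r2 := by
        cases hr; exact ⟨rfl, rfl⟩
      subst hceq; subst hteq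
      refine ⟨?_, ?_⟩
      · rw [List.takeWhile_cons_of_pos (by decide : pvNS ':' = true)]
        rw [List.takeWhile_cons_of_neg (by decide : ¬ pvNSC ':' = true)]
        rfl
      · rw [List.dropWhile_cons_of_pos (by decide : pvNS ':' = true)]

-- behaviour of pvNSC-dropWhile when it does not stop at a ':'
theorem pvT3 (l : List Char) (h : ∀ r2 : List Char, l.dropWhile pvNSC ≠ ':' :: r2) :
    l.takeWhile pvNS = l.takeWhile pvNSC ∧ l.dropWhile pvNS = l.dropWhile pvNSC := by
  induction l with
  | nil => simp
  | cons c t ih =>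
    by_cases hc : pvNSC c
    · have hns : pvNS c = true := by
        simp only [pvNSC, Bool.and_eq_true] at hc
        exact hc.1
      rw [List.dropWhile_cons_of_pos hc] at h
      obtain ⟨h1, h2⟩ := ih h
      refine ⟨?_, ?_⟩
      · rw [List.takeWhile_cons_of_pos hns, List.takeWhile_cons_of_pos hc, h1]
      · rw [List.dropWhile_cons_of_pos hns, List.dropWhile_cons_of_pos hc, h2]
    · have hcs : c = '/' ∨ c = ':' := by
        simp only [pvNSC, Bool.and_eq_true, Bool.not_eq_true', beq_eq_false_iff_ne] at hc
        by_cases h1 : c = '/'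
        · exact Or.inl h1
        · by_cases h2 : c = ':'
          · exact Or.inr h2
          · exact absurd ⟨h1, h2⟩ hc
      have hcslash : c = '/' := by
        rcases hcs with h1 | h2
        · exact h1
        · exfalso
          apply h t
          rw [List.dropWhile_cons_of_neg (by simpa using hc), h2]
      subst hcslash
      refine ⟨?_, ?_⟩
      · rw [List.takeWhile_cons_of_neg (by decide : ¬ pvNS '/' = true),
            List.takeWhile_cons_of_neg (by simpa using hc)]
      · rw [List.dropWhile_cons_of_neg (by decide : ¬ pvNS '/' = true),
            List.dropWhile_cons_of_neg (by simpa using hc)]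

theorem pvTailParts_dropWhile (l : List Char) :
    pvTailParts (l.dropWhile pvNS) = pvTailParts l := by
  induction l with
  | nil => rfl
  | cons c rest ih =>
    by_cases hc : pvNS c
    · rw [List.dropWhile_cons_of_pos hc]
      rw [ih]
      simp only [pvTailParts, List.dropWhile_cons_of_pos hc]
    · simp only [pvTailParts, List.dropWhile_cons_of_neg (by simpa using hc)]

theorem pvScanB_eq (cs : List Char) : pvScanB cs = pvPairs (pvTailParts cs) := by
  induction cs using pvScanB.induct with
  | case1 => rw [pvScanB.eq_def]; rfl
  | case2 rest hd =>
    rw [pvScanB.eq_def]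
    simp only [reduceIte]
    split
    next heq =>
      obtain ⟨h1, h2⟩ := pvT3 rest (fun r2 h => by rw [hd] at h; cases h)
      have hTP : pvTailParts ('/' :: rest) = pvMySplit rest := by
        simp only [pvTailParts, List.dropWhile_cons_of_neg (by decide : ¬ pvNS '/' = true)]
      have hnc : ':' ∉ rest.takeWhile pvNS := by
        rw [h1]
        intro hx
        have hx' := List.mem_takeWhile_imp hx
        simp [pvNSC] at hx'
      rw [hTP, pvMySplit_eq rest]
      simp only [pvPairs, List.filterMap_cons, if_neg hnc]
      have hTr : pvTailParts rest = [] := by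
        simp only [pvTailParts, h2, hd]
      rw [hTr]
      rfl
    next d r2' heq =>
      rw [hd] at heq; cases heq
  | case3 rest r2 hr ih =>
    rw [pvScanB.eq_def]
    simp only [reduceIte]
    split
    next heq => rw [hr] at heq; cases heq
    next d r2' heq =>
      rw [hr] at heq
      injection heq with he1 he2
      subst he1
      rw [← he2]
      simp only [reduceIte]
      rw [ih]
      have hTP : pvTailParts ('/' :: rest) = pvMySplit rest := by
        simp only [pvTailParts, List.dropWhile_cons_of_neg (by decide : ¬ pvNS '/' = true)]
      rw [hTP, pvMySplit_eq rest]
      obtain ⟨h1, h2⟩ := pvT2 rest r2 hr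
      have hall : ∀ x ∈ rest.takeWhile pvNSC, pvNC x = true := by
        intro x hx
        have hx' := List.mem_takeWhile_imp hx
        simp only [pvNSC, Bool.and_eq_true] at hx'
        exact hx'.2
      have htw : (rest.takeWhile pvNSC).takeWhile pvNC = rest.takeWhile pvNSC :=
        List.takeWhile_eq_self_iff.mpr hall
      have hdw : (rest.takeWhile pvNSC).dropWhile pvNC = [] :=
        List.dropWhile_eq_nil_iff.mpr hall
      have hp : ':' ∈ rest.takeWhile pvNS := by rw [h1]; simp
      have hkey : (rest.takeWhile pvNS).takeWhile pvNC = rest.takeWhile pvNSC := by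
        rw [h1, List.takeWhile_append, if_pos (by rw [htw])]
        rw [List.takeWhile_cons_of_neg (by decide : ¬ pvNC ':' = true)]
        simp
      have hval : ((rest.takeWhile pvNS).dropWhile pvNC).tail = r2.takeWhile pvNS := by
        rw [h1, List.dropWhile_append, if_pos (by rw [hdw]; rfl)]
        rw [List.dropWhile_cons_of_neg (by decide : ¬ pvNC ':' = true)]
        rfl
      simp only [pvPairs, List.filterMap_cons, if_pos hp, hkey, hval]
      have hcont : pvTailParts (r2.dropWhile pvNS) = pvTailParts rest := by
        rw [pvTailParts_dropWhile r2]
        simp only [pvTailParts, h2]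
      rw [hcont]
  | case4 rest d r2 hr hd ih =>
    rw [pvScanB.eq_def]
    simp only [reduceIte]
    split
    next heq => rw [hr] at heq; cases heq
    next d' r2' heq =>
      rw [hr] at heq
      injection heq with he1 he2
      rw [← he1, ← he2]
      rw [if_neg hd]
      have hds : d = '/' := by
        have hfail : pvNSC d = false := by
          have hh := List.head_dropWhile_not pvNSC (l := rest)
          rw [hr] at hh
          simpa using hh (by simp)
        simp only [pvNSC, Bool.and_eq_false_iff] at hfail
        rcases hfail with h | h
        · simp only [Bool.not_eq_false', beq_iff_eq] at h
          exact h
        · exfalso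
          simp only [Bool.not_eq_false', beq_iff_eq] at h
          exact hd h
      have hne : ∀ r3 : List Char, rest.dropWhile pvNSC ≠ ':' :: r3 := by
        intro r3 h
        rw [hr] at h
        cases h
        exact hd rfl
      obtain ⟨h1, h2⟩ := pvT3 rest hne
      rw [ih]
      subst hds
      have hTP : pvTailParts ('/' :: rest) = pvMySplit rest := by
        simp only [pvTailParts, List.dropWhile_cons_of_neg (by decide : ¬ pvNS '/' = true)]
      have hnc : ':' ∉ rest.takeWhile pvNS := by
        rw [h1]
        intro hx
        have hx' := List.mem_takeWhile_imp hx
        simp [pvNSC] at hx'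
      rw [hTP, pvMySplit_eq rest]
      simp only [pvPairs, List.filterMap_cons, if_neg hnc]
      have hl : pvTailParts ('/' :: r2) = pvMySplit r2 := by
        simp only [pvTailParts, List.dropWhile_cons_of_neg (by decide : ¬ pvNS '/' = true)]
      have hr' : pvTailParts rest = pvMySplit r2 := by
        simp only [pvTailParts, h2, hr]
      rw [hl, hr']
  | case5 c rest hc ih =>
    rw [pvScanB.eq_def]
    simp only [if_neg hc]
    rw [ih]
    have hTc : pvTailParts (c :: rest) = pvTailParts rest := by
      simp only [pvTailParts, List.dropWhile_cons_of_pos (by simp [pvNS, hc] : pvNS c = true)]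
    rw [hTc]

-- ===== VERDICT (by name: the statement is the Claim_ definition above) =====
theorem parse_cvss4_vector_spec : Claim_equal_parse_cvss4_vector := by
  intro s _
  unfold Spec_parse_cvss4_vector
  by_cases hemp : s = ""
  · subst hemp; rfl
  · by_cases hsl : PySem.Str.isIn "/" s = true
    · -- main case: the string is nonempty and contains a '/'
      have hbr := PySem.Str.split?_map s "/"
      rw [show ("/" : String).toList = ['/'] from rfl] at hbr
      rw [PySem.Chars.split?.eq_1] at hbr
      simp only [List.isEmpty_cons, Bool.false_eq_true, if_false] at hbr
      rw [pvSplitOn_eq s.toList] at hbr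
      cases hs : PySem.Str.split? s "/" with
      | none => rw [hs] at hbr; simp at hbr
      | some ls =>
        rw [hs] at hbr
        simp only [Option.map_some, Option.some.injEq] at hbr
        have hls : ls = (pvMySplit s.toList).map String.ofList := pvMapToList ls _ hbr
        simp only [parse_cvss4_vector, parse_cvss4_vector_alt,
          beq_iff_eq, hemp, hsl, Bool.not_true, Bool.or_false,
          if_false, hs, Option.getD_some]
        rw [hls, pvMySplit_eq s.toList]
        simp only [List.map_cons, List.drop_succ_cons, List.drop_zero]
        rw [List.foldl_map]
        simp only [pvBody]
        rw [pvFold]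
        rw [pvScanB_eq s.toList]
        rfl
    · -- '/' not in the string: A returns {} by its guard, B finds no match
      have hnot : '/' ∉ s.toList := by
        intro hmem
        exact hsl ((PySem.Str.isIn_iff_infix "/" s).mpr
          (by simpa [List.singleton_infix_iff] using hmem))
      have hdw : s.toList.dropWhile pvNS = [] := by
        rw [List.dropWhile_eq_nil_iff]
        intro x hx
        by_cases hx' : x = '/'
        · exact absurd (hx' ▸ hx) hnot
        · simp [pvNS, hx']
      have hscan : pvScanB s.toList = [] := by
        rw [pvScanB_eq]
        simp only [pvTailParts, hdw]
        rfl
      simp only [parse_cvss4_vector, parse_cvss4_vector_alt, beq_iff_eq, hemp, hsl,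
        Bool.not_false, Bool.or_true, if_true, hscan]
      rfl
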